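-- pv_equiv track=rewrite | github.com/Teeeeg/AlgorithmOA | OnSite/Aug26MS2.py | solution
-- ===== SOURCE A (Python) =====
-- def solution(A, M):
--     if not A:
--         return 0
--
--     n = len(A)
--
--     res = 0
--
--     for i in range(n):
--         count = 0
--         for j in range(n):
--             diff = abs(A[i] - A[j])
--
--             if diff % M == 0:
--                 count += 1
--
--         res = max(count, res)
--
--     return res
-- ===== SOURCE B (Python) =====
-- def solution(A, M):
--     if not A:
--         return 0
--     rs = sorted(a % M for a in A)
--     best = 1
--     run = 1
--     prev = rs[0]
--     for r in rs[1:]: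
--         if r == prev:
--             run += 1
--         else:
--             run = 1
--             prev = r
--         if run > best:
--             best = run
--     return best
-- ===== Notes on version B (the rewrite author's own statement) =====
-- stated objective: faster
-- what changed: Replaces the all-pairs double loop over |A[i]-A[j]| % M with computing each residue a % M once, sorting the residues and scanning once for the longest run of equal residues.
import Mathlib
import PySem

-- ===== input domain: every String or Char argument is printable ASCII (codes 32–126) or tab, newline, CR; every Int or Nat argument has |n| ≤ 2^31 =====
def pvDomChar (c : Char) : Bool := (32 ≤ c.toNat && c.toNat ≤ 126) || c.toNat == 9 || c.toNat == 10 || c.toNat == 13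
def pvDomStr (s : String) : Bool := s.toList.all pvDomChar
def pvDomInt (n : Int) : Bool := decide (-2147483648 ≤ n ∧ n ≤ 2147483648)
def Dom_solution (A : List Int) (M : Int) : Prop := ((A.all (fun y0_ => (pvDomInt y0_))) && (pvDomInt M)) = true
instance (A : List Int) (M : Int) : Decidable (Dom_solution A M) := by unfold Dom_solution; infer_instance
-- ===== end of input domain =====

-- B replaces A's all-pairs divisibility scan by sorting the residues a % M once and
-- scanning once for the longest run of equal residues.

-- ===== PORT A =====
def solution (A : List Int) (M : Int) : Int :=
  if A = [] then 0
  else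
    let n : Int := A.length
    (PySem.List.pyRange 0 n 1).foldl
      (fun res i =>
        let count :=
          (PySem.List.pyRange 0 n 1).foldl
            (fun count j =>
              let diff := |PySem.List.pyGetD A i 0 - PySem.List.pyGetD A j 0|
              if PySem.Int.mod diff M = 0 then count + 1 else count)
            0
        max count res)
      0

-- ===== PORT B =====
-- the scan over rs[1:] from Source B, state (prev, run, best)
def altLoop : List Int → Int → Int → Int → Int
  | [], _, _, best => best
  | r :: t, prev, run, best =>
    if r = prev then
      altLoop t prev (run + 1) (if run + 1 > best then run + 1 else best)
    else
      altLoop t r 1 (if 1 > best then 1 else best)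

def solution_alt (A : List Int) (M : Int) : Int :=
  if A = [] then 0
  else
    match PySem.List.sorted (A.map (fun a => PySem.Int.mod a M)) (fun x => x) false with
    | [] => 0
    | r0 :: rest => altLoop rest r0 1 1

-- ===== PRECONDITION & SPEC =====
-- Pre_ excludes exactly the inputs where Python A raises ZeroDivisionError: M = 0 with A nonempty.
def Pre_solution (A : List Int) (M : Int) : Prop := A = [] ∨ M ≠ 0
instance (A : List Int) (M : Int) : Decidable (Pre_solution A M) := by unfold Pre_solution; infer_instance

def pvWitness_solution : List Int × Int := ([3, 1, 7, 4, 10], 3)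

def Spec_solution (A : List Int) (M : Int) (out : Int) : Prop := out = solution_alt A M
instance (A : List Int) (M : Int) (out : Int) : Decidable (Spec_solution A M out) := by unfold Spec_solution; infer_instance

-- ===== CLAIM (what is proved, stated in full; the proofs are below) =====
def Claim_equal_solution : Prop := ∀ (A : List Int) (M : Int), Dom_solution A M → Pre_solution A M → Spec_solution A M (solution A M)

-- ===== LEMMAS AND PROOFS =====

-- the maximum multiplicity of an element of s, as the running max of the counts
def maxCount (s : List Int) : Int :=
  (s.map (fun r => (s.count r : Int))).foldl max 0

lemma maxCount_nonneg (s : List Int) : 0 ≤ maxCount s := by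
  have := (PySem.List.le_foldl_max_int s (fun r => (s.count r : Int)) 0).1
  simpa [maxCount, List.foldl_map] using this

lemma count_le_maxCount {s : List Int} {r : Int} (h : r ∈ s) : (s.count r : Int) ≤ maxCount s := by
  have := (PySem.List.le_foldl_max_int s (fun r => (s.count r : Int)) 0).2 r h
  simpa [maxCount, List.foldl_map] using this

lemma maxCount_mem_or_zero (s : List Int) : maxCount s = 0 ∨ ∃ r ∈ s, maxCount s = (s.count r : Int) := by
  rcases PySem.List.foldl_max_mem (s.map (fun r => (s.count r : Int))) 0 with h | h
  · exact Or.inl h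
  · rcases List.mem_map.1 h with ⟨r, hr, hv⟩
    exact Or.inr ⟨r, hr, hv.symm⟩

lemma maxCount_perm {s s' : List Int} (hp : s.Perm s') : maxCount s = maxCount s' := by
  have key : ∀ {a b : List Int}, a.Perm b → maxCount a ≤ maxCount b := by
    intro a b hab
    rcases maxCount_mem_or_zero a with h | ⟨r, hr, hv⟩
    · exact h.le.trans (maxCount_nonneg b)
    · rw [hv, hab.count_eq r]
      exact count_le_maxCount (hab.mem_iff.1 hr)
  exact le_antisymm (key hp) (key hp.symm)

lemma maxCount_cons (x : Int) (t : List Int) :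
    maxCount (x :: t) = max (1 + (t.count x : Int)) (maxCount (t.filter (fun r => r ≠ x))) := by
  have hcx : ((x :: t).count x : Int) = 1 + (t.count x : Int) := by
    simp [List.count_cons_self]; ring
  have hcne : ∀ {r : Int}, r ≠ x → (t.filter (fun r => r ≠ x)).count r = (x :: t).count r := by
    intro r hrx
    rw [List.count_filter (by simp [hrx]), List.count_cons]
    simp [Ne.symm hrx]
  apply le_antisymm
  · rcases maxCount_mem_or_zero (x :: t) with h | ⟨r, hr, hv⟩
    · rw [h]; positivity
    · rw [hv]
      by_cases hrx : r = x
      · subst hrx; rw [hcx]; exact le_max_left _ _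
      · have hrt : r ∈ t := by
          rcases List.mem_cons.1 hr with h | h
          · exact absurd h hrx
          · exact h
        have : ((x :: t).count r : Int) ≤ maxCount (t.filter (fun r => r ≠ x)) := by
          rw [← hcne hrx]
          exact count_le_maxCount (List.mem_filter.2 ⟨hrt, by simp [hrx]⟩)
        exact this.trans (le_max_right _ _)
  · apply max_le
    · rw [← hcx]; exact count_le_maxCount (List.mem_cons_self)
    · rcases maxCount_mem_or_zero (t.filter (fun r => r ≠ x)) with h | ⟨r, hr, hv⟩
      · rw [h]; exact maxCount_nonneg _
      · rw [hv]
        have hrx : r ≠ x := by have := List.mem_filter.1 hr; simpa using this.2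
        rw [hcne hrx]
        exact count_le_maxCount (List.mem_cons_of_mem _ (List.mem_filter.1 hr).1)

-- loop invariant for B's scan over the sorted tail
lemma altLoop_spec (t : List Int) : ∀ (prev run best : Int),
    t.Pairwise (· ≤ ·) → (∀ x ∈ t, prev ≤ x) → 1 ≤ run → run ≤ best →
    altLoop t prev run best
      = max best (max (run + (t.count prev : Int)) (maxCount (t.filter (fun r => r ≠ prev)))) := by
  induction t with
  | nil =>
    intro prev run best _ _ h1 h2
    simp only [altLoop, List.count_nil, List.filter_nil, Nat.cast_zero]
    have h0 : maxCount ([] : List Int) = 0 := rfl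
    omega
  | cons x t ih =>
    intro prev run best hs hge h1 h2
    have hxt : ∀ y ∈ t, x ≤ y := by
      intro y hy; exact (List.pairwise_cons.1 hs).1 y hy
    have hst : t.Pairwise (· ≤ ·) := (List.pairwise_cons.1 hs).2
    by_cases hx : x = prev
    · subst hx
      rw [altLoop, if_pos rfl,
        ih x (run + 1) (if run + 1 > best then run + 1 else best) hst hxt (by omega) (by split <;> omega)]
      have hc : 0 ≤ (t.count x : Int) := by positivity
      have hm : 0 ≤ maxCount (t.filter (fun r => r ≠ x)) := maxCount_nonneg _
      simp only [List.count_cons_self, List.filter_cons, ne_eq, not_true_eq_false, decide_false]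
      push_cast
      split <;> omega
    · have hpx : prev < x := lt_of_le_of_ne (hge x List.mem_cons_self) (fun h => hx h.symm)
      rw [altLoop, if_neg hx, ih x 1 (if 1 > best then 1 else best) hst hxt le_rfl (by split <;> omega)]
      have hif : (if 1 > best then 1 else best) = best := by split <;> omega
      rw [hif]
      -- prev does not occur in x :: t, and the filter by ≠ prev keeps everything
      have hnp : ∀ y ∈ x :: t, prev ≠ y := by
        intro y hy
        rcases List.mem_cons.1 hy with h | h
        · omega
        · have := hxt y h; omega
      have hcp : ((x :: t).count prev : Int) = 0 := by
        rw [List.count_eq_zero.2 (fun h => hnp prev h rfl)]; simp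
      have hfp : (x :: t).filter (fun r => r ≠ prev) = x :: t := by
        apply List.filter_eq_self.2
        intro y hy; simpa using (hnp y hy).symm
      rw [hcp, hfp, maxCount_cons]
      have hc : 0 ≤ (t.count x : Int) := by positivity
      have hm : 0 ≤ maxCount (t.filter (fun r => r ≠ x)) := maxCount_nonneg _
      omega

-- residues agree mod M iff M divides the difference (any M ≠ 0)
lemma mod_eq_mod_iff_dvd {M : Int} (hM : M ≠ 0) (a b : Int) :
    PySem.Int.mod a M = PySem.Int.mod b M ↔ M ∣ (a - b) := by
  rcases lt_or_gt_of_ne hM with hneg | hpos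
  · have ha := PySem.Int.mod_neg_neg (-a) (-M)
    have hb := PySem.Int.mod_neg_neg (-b) (-M)
    simp only [neg_neg] at ha hb
    rw [ha, hb, neg_inj, PySem.Int.mod_eq_emod_of_pos (by omega : (0:Int) < -M),
      PySem.Int.mod_eq_emod_of_pos (by omega : (0:Int) < -M),
      Int.emod_eq_emod_iff_emod_sub_eq_zero]
    constructor
    · intro h
      rcases Int.dvd_of_emod_eq_zero h with ⟨k, hk⟩
      exact ⟨k, by linarith⟩
    · intro h
      apply Int.emod_eq_zero_of_dvd
      rcases h with ⟨k, hk⟩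
      exact ⟨k, by linarith⟩
  · rw [PySem.Int.mod_eq_emod_of_pos hpos, PySem.Int.mod_eq_emod_of_pos hpos,
      Int.emod_eq_emod_iff_emod_sub_eq_zero]
    exact ⟨Int.dvd_of_emod_eq_zero, Int.emod_eq_zero_of_dvd⟩

lemma cond_iff {M : Int} (hM : M ≠ 0) (a b : Int) :
    (PySem.Int.mod |a - b| M = 0) ↔ (PySem.Int.mod b M = PySem.Int.mod a M) := by
  rw [PySem.Int.mod_eq_zero_iff_dvd, mod_eq_mod_iff_dvd hM, dvd_abs]
  exact ⟨fun h => dvd_sub_comm.1 h, fun h => dvd_sub_comm.1 h⟩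

lemma foldl_max_swap (f : Int → Int) (l : List Int) : ∀ init : Int,
    l.foldl (fun res a => max (f a) res) init = l.foldl (fun acc a => max acc (f a)) init := by
  induction l with
  | nil => intro _; rfl
  | cons x t ih => intro init; simp only [List.foldl_cons]; rw [max_comm, ih]

-- A computes the maximum residue-multiplicity
lemma solution_eq_maxCount {A : List Int} {M : Int} (hA : A ≠ []) (hM : M ≠ 0) :
    solution A M = maxCount (A.map (fun a => PySem.Int.mod a M)) := by
  unfold solution
  rw [if_neg hA]
  rw [PySem.List.foldl_pyRange_zero_pyGetD' A 0
    (fun res a =>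
      max ((PySem.List.pyRange 0 (A.length : Int) 1).foldl
            (fun count j =>
              if PySem.Int.mod |a - PySem.List.pyGetD A j 0| M = 0 then count + 1 else count) 0) res) 0]
  have inner : ∀ a : Int,
      (PySem.List.pyRange 0 (A.length : Int) 1).foldl
        (fun count j => if PySem.Int.mod |a - PySem.List.pyGetD A j 0| M = 0 then count + 1 else count) 0
      = ((A.map (fun x => PySem.Int.mod x M)).count (PySem.Int.mod a M) : Int) := by
    intro a
    rw [PySem.List.foldl_pyRange_zero_pyGetD' A 0
      (fun count b => if PySem.Int.mod |a - b| M = 0 then count + 1 else count) 0]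
    have hcond : ∀ b : Int,
        (PySem.Int.mod |a - b| M = 0) = (decide (PySem.Int.mod b M = PySem.Int.mod a M) = true) := by
      intro b; simp [cond_iff hM a b]
    simp only [hcond]
    rw [PySem.List.foldl_count_if (fun b => decide (PySem.Int.mod b M = PySem.Int.mod a M)) A 0]
    rw [List.count, List.countP_map]
    have hfun : List.countP ((fun x => x == PySem.Int.mod a M) ∘ fun x => PySem.Int.mod x M) A
        = List.countP (fun b => decide (PySem.Int.mod b M = PySem.Int.mod a M)) A := by
      apply List.countP_congr
      intro b _
      simp [Function.comp]
    rw [hfun]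
    omega
  simp only [inner]
  unfold maxCount
  rw [List.foldl_map, List.foldl_map]
  exact foldl_max_swap _ A 0

theorem solution_spec : Claim_equal_solution := by
  intro A M _ hpre
  unfold Spec_solution
  by_cases hA : A = []
  · subst hA; rfl
  · have hM : M ≠ 0 := by
      rcases hpre with h | h
      · exact absurd h hA
      · exact h
    unfold solution_alt
    rw [if_neg hA]
    have hrsne : A.map (fun a => PySem.Int.mod a M) ≠ [] := by simpa using hA
    rcases hsrt : PySem.List.sorted (A.map (fun a => PySem.Int.mod a M)) (fun x => x) false with _ | ⟨r0, rest⟩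
    · exact absurd ((PySem.List.sorted_eq_nil_iff _ _ _).1 hsrt) hrsne
    · have hpair : (r0 :: rest).Pairwise (· ≤ ·) := by
        have := PySem.List.sorted_pairwise (A.map (fun a => PySem.Int.mod a M)) (fun x => x)
        rwa [hsrt] at this
      have hperm : (r0 :: rest).Perm (A.map (fun a => PySem.Int.mod a M)) := by
        have := PySem.List.sorted_perm (A.map (fun a => PySem.Int.mod a M)) (fun x => x) false
        rwa [hsrt] at this
      rw [solution_eq_maxCount hA hM, ← maxCount_perm hperm]
      show maxCount (r0 :: rest) = altLoop rest r0 1 1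
      rw [altLoop_spec rest r0 1 1 (List.pairwise_cons.1 hpair).2 (List.pairwise_cons.1 hpair).1 le_rfl le_rfl,
        maxCount_cons]
      have hc : 0 ≤ (rest.count r0 : Int) := by positivity
      have hm : 0 ≤ maxCount (rest.filter (fun r => r ≠ r0)) := maxCount_nonneg _
      omega
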